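-- pv_equiv track=rewrite | github.com/MM-Collaboration-2/Project-Yer | src/utils.py | brackets_not_in_string
-- ===== SOURCE A (Python) =====
-- def brackets_not_in_string(text: str, open_bracket='(', close_bracket=')') -> bool:
--     quotes: int = 0
--     brackets: int = 0
--     for ch in text:
--         if ch == '"':
--             quotes += 1
--             quotes %= 2
--
--         if quotes == 0 and ch == open_bracket:
--             brackets += 1
--         if quotes == 0 and ch == close_bracket:
--             brackets -= 1
--
--     return brackets
-- ===== SOURCE B (Python) =====
-- def brackets_not_in_string(text: str, open_bracket='(', close_bracket=')') -> bool:
--     total = 0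
--     for i, seg in enumerate(text.split('"')):
--         if i % 2 == 0:
--             total += sum(c == open_bracket for c in seg) - sum(c == close_bracket for c in seg)
--     return total
-- ===== Notes on version B (the rewrite author's own statement) =====
-- stated objective: alternative
-- what changed: Replaces the char-by-char scan with a stateful quote-parity toggle by splitting the text on '"' into segments that alternate outside/inside quotes and summing per-character bracket matches over the even-indexed (outside-quote) segments. Pre_ excludes inputs where a bracket argument is the quote character '"' itself, on which A counts the quote characters themselves as brackets on alternate occurrences — an accident of its toggle-before-test order on a degenerate corner.
-- outside the precondition, e.g. on brackets_not_in_string('"a"', '"', ')'): A returns 1, B returns 0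
import Mathlib
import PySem

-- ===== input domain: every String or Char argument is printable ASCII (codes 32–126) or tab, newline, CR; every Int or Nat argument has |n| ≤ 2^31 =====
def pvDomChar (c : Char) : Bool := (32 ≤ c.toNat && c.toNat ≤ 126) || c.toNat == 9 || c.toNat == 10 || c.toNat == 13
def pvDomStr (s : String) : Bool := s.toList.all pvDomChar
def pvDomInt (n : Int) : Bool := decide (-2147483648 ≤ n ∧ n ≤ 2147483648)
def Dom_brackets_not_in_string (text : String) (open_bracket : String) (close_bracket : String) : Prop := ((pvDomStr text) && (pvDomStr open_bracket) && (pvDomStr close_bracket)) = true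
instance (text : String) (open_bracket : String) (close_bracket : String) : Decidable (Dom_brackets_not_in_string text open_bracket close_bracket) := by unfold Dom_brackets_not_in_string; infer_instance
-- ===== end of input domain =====

-- B replaces A's char-by-char quote-parity toggle with a split-on-quote partition and
-- per-segment counting over the even-indexed (outside-quote) segments; same cost.

-- ===== PORT A =====
-- literal transliteration: fold over the characters with state (quotes, brackets);
-- 'ch == open_bracket' compares the one-char string against the bracket argument.
def brackets_not_in_string (text : String) (open_bracket : String) (close_bracket : String) : Int :=
  (text.toList.foldl
    (fun (st : Int × Int) ch =>
      let quotes := if ch == '"' then PySem.Int.mod (st.1 + 1) 2 else st.1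
      let b1 := if quotes == 0 && (String.singleton ch == open_bracket) then st.2 + 1 else st.2
      let b2 := if quotes == 0 && (String.singleton ch == close_bracket) then b1 - 1 else b1
      (quotes, b2))
    (0, 0)).2

-- ===== PORT B =====
-- text.split('"') for the single-character separator '"' is List.splitOn '"' on the characters
-- (Python-exact for a one-char separator); sum(c == bracket for c in seg) is countP.
def brackets_not_in_string_alt (text : String) (open_bracket : String) (close_bracket : String) : Int :=
  (PySem.List.enumerate (List.splitOn '"' text.toList) 0).foldl
    (fun (total : Int) p =>
      if PySem.Int.mod p.1 2 == 0 then
        total + ((p.2.countP (fun ch => String.singleton ch == open_bracket) : Int)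
               - (p.2.countP (fun ch => String.singleton ch == close_bracket) : Int))
      else total)
    0

-- ===== PRECONDITION & SPEC =====
-- Pre_ excludes only inputs where a bracket argument is the quote character '"' itself, on which
-- A counts the quote characters themselves as brackets on alternate occurrences — an accident of
-- its toggle-before-test order on a degenerate corner; B naturally counts nothing there.
def Pre_brackets_not_in_string (text : String) (open_bracket : String) (close_bracket : String) : Prop :=
  open_bracket ≠ "\"" ∧ close_bracket ≠ "\""
instance (text : String) (open_bracket : String) (close_bracket : String) : Decidable (Pre_brackets_not_in_string text open_bracket close_bracket) := by unfold Pre_brackets_not_in_string; infer_instance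

def pvWitness_brackets_not_in_string : String × String × String := ("a(b \"(x)\" (c))", "(", ")")

def Spec_brackets_not_in_string (text : String) (open_bracket : String) (close_bracket : String) (out : Int) : Prop := out = brackets_not_in_string_alt text open_bracket close_bracket
instance (text : String) (open_bracket : String) (close_bracket : String) (out : Int) : Decidable (Spec_brackets_not_in_string text open_bracket close_bracket out) := by unfold Spec_brackets_not_in_string; infer_instance

-- ===== CLAIM (what is proved, stated in full; the proofs are below) =====
def Claim_equal_brackets_not_in_string : Prop := ∀ (text : String) (open_bracket : String) (close_bracket : String), Dom_brackets_not_in_string text open_bracket close_bracket → Pre_brackets_not_in_string text open_bracket close_bracket → Spec_brackets_not_in_string text open_bracket close_bracket (brackets_not_in_string text open_bracket close_bracket)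

-- ===== LEMMAS AND PROOFS =====

-- net score of one character outside quotes
def pvCharScore (o c : String) (ch : Char) : Int :=
  (if String.singleton ch == o then 1 else 0) - (if String.singleton ch == c then 1 else 0)

-- net score of one outside-quote segment
def pvSegScore (o c : String) (s : List Char) : Int :=
  ((s.countP (fun ch => String.singleton ch == o) : Int)
   - (s.countP (fun ch => String.singleton ch == c) : Int))

-- alternating sum over segments: even positions (flag true) contribute their score
def pvAltSum (o c : String) : Bool → List (List Char) → Int
  | _, [] => 0
  | e, s :: rest => (if e then pvSegScore o c s else 0) + pvAltSum o c (!e) rest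

theorem pvSegScore_nil (o c : String) : pvSegScore o c [] = 0 := by
  simp [pvSegScore]

theorem pvSegScore_cons (o c : String) (ch : Char) (s : List Char) :
    pvSegScore o c (ch :: s) = pvCharScore o c ch + pvSegScore o c s := by
  simp only [pvSegScore, pvCharScore, List.countP_cons]
  split_ifs <;> push_cast <;> ring

theorem pvAltSum_modifyHead (o c : String) (e : Bool) (ch : Char)
    (segs : List (List Char)) (h : segs ≠ []) :
    pvAltSum o c e (segs.modifyHead (List.cons ch)) =
      (if e then pvCharScore o c ch else 0) + pvAltSum o c e segs := by
  cases segs with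
  | nil => exact absurd rfl h
  | cons s rest =>
      simp only [List.modifyHead, pvAltSum, pvSegScore_cons]
      split_ifs <;> ring

-- A's fold, named for the induction
def pvStepA (o c : String) (st : Int × Int) (ch : Char) : Int × Int :=
  let quotes := if ch == '"' then PySem.Int.mod (st.1 + 1) 2 else st.1
  let b1 := if quotes == 0 && (String.singleton ch == o) then st.2 + 1 else st.2
  let b2 := if quotes == 0 && (String.singleton ch == c) then b1 - 1 else b1
  (quotes, b2)

theorem pvMain (o c : String) (ho : o ≠ "\"") (hc : c ≠ "\"") :
    ∀ (cs : List Char) (q b : Int), (q = 0 ∨ q = 1) →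
      (cs.foldl (pvStepA o c) (q, b)).2
        = b + pvAltSum o c (q == 0) (cs.splitOnP (· == '"')) := by
  intro cs
  induction cs with
  | nil => intro q b _; simp [pvAltSum, List.splitOnP_nil, pvSegScore_nil]
  | cons ch cs ih =>
      intro q b hq
      by_cases hch : ch = '"'
      · subst hch
        have hsq : String.singleton '"' = "\"" := rfl
        have hqo : (String.singleton '"' == o) = false := by
          rw [hsq, beq_eq_false_iff_ne]; exact fun h => ho h.symm
        have hqc : (String.singleton '"' == c) = false := by
          rw [hsq, beq_eq_false_iff_ne]; exact fun h => hc h.symm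
        have hstep : pvStepA o c (q, b) '"' = (PySem.Int.mod (q + 1) 2, b) := by
          simp [pvStepA, hqo, hqc]
        have hq' : PySem.Int.mod (q + 1) 2 = 0 ∨ PySem.Int.mod (q + 1) 2 = 1 := by
          rcases hq with h | h <;> subst h <;> decide
        have hflip : (PySem.Int.mod (q + 1) 2 == 0) = !(q == 0) := by
          rcases hq with h | h <;> subst h <;> decide
        rw [List.foldl_cons, hstep, ih _ _ hq']
        simp only [List.splitOnP_cons, beq_self_eq_true, if_true, pvAltSum,
          pvSegScore_nil, hflip]
        split_ifs <;> ring
      · have hne : (ch == '"') = false := by simp [hch]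
        have hsplit : List.splitOnP (fun x => x == '"') (ch :: cs)
            = List.modifyHead (List.cons ch) (List.splitOnP (fun x => x == '"') cs) := by
          rw [List.splitOnP_cons, if_neg (by simp [hch])]
        rcases hq with h | h <;> subst h
        · have hstep : pvStepA o c (0, b) ch = (0, b + pvCharScore o c ch) := by
            simp only [pvStepA, hne, Bool.false_eq_true, if_false, pvCharScore]
            split_ifs <;> simp_all <;> ring
          rw [List.foldl_cons, hstep, ih _ _ (Or.inl rfl), hsplit,
            pvAltSum_modifyHead o c _ ch _ (List.splitOnP_ne_nil _ _)]
          norm_num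
          ring
        · have hstep : pvStepA o c (1, b) ch = (1, b) := by
            simp [pvStepA, hne, show ((1 : Int) == 0) = false from by decide]
          rw [List.foldl_cons, hstep, ih _ _ (Or.inr rfl), hsplit,
            pvAltSum_modifyHead o c _ ch _ (List.splitOnP_ne_nil _ _)]
          simp [show ((1 : Int) == 0) = false from by decide]

-- B's enumerate-fold equals the alternating sum
theorem pvEnumFold (o c : String) :
    ∀ (segs : List (List Char)) (n t : Int), 0 ≤ n →
      (PySem.List.enumerate segs n).foldl
        (fun (total : Int) p =>
          if PySem.Int.mod p.1 2 == 0 then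
            total + ((p.2.countP (fun ch => String.singleton ch == o) : Int)
                   - (p.2.countP (fun ch => String.singleton ch == c) : Int))
          else total) t
        = t + pvAltSum o c (PySem.Int.mod n 2 == 0) segs := by
  intro segs
  induction segs with
  | nil => intro n t _; simp [PySem.List.enumerate_nil, pvAltSum]
  | cons s rest ih =>
      intro n t hn
      rw [PySem.List.enumerate_cons, List.foldl_cons, ih (n + 1) _ (by omega)]
      have hm : PySem.Int.mod n 2 = n % 2 := PySem.Int.mod_eq_emod_of_pos (by decide)
      have hm1 : PySem.Int.mod (n + 1) 2 = (n + 1) % 2 := PySem.Int.mod_eq_emod_of_pos (by decide)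
      have hpar : (PySem.Int.mod (n + 1) 2 == 0) = !(PySem.Int.mod n 2 == 0) := by
        rcases Int.emod_two_eq n with h | h
        · have h1 : (n + 1) % 2 = 1 := by omega
          rw [hm, hm1, h, h1]; decide
        · have h1 : (n + 1) % 2 = 0 := by omega
          rw [hm, hm1, h, h1]; decide
      rw [hpar]
      simp only [pvAltSum, pvSegScore]
      split_ifs <;> ring

-- ===== VERDICT (by name: the statement is the Claim_ definition above) =====
theorem brackets_not_in_string_spec : Claim_equal_brackets_not_in_string := by
  intro text o c _ hpre
  unfold Spec_brackets_not_in_string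
  have hA := pvMain o c hpre.1 hpre.2 text.toList 0 0 (Or.inl rfl)
  have hB := pvEnumFold o c (List.splitOn '"' text.toList) 0 0 le_rfl
  have eA : brackets_not_in_string text o c
      = (List.foldl (pvStepA o c) ((0 : Int), (0 : Int)) text.toList).2 := rfl
  rw [eA, hA]
  unfold brackets_not_in_string_alt
  rw [hB, List.splitOn]
  simp [show PySem.Int.mod (0 : Int) 2 = 0 from by decide]
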